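-- pv_equiv track=rewrite | github.com/Maor2871/UniversityTasks | משימה 5/hw5_318879608.py | prefix_suffix_overlap_hash1
-- ===== SOURCE A (Python) =====
-- class Dict:
--     def __init__(self, m, hash_func=hash):
--         """ initial hash table, m empty entries """
--         self.table = [[] for i in range(m)]
--         self.hash_mod = lambda x: hash_func(x) % m
--
--     def __repr__(self):
--         L = [self.table[i] for i in range(len(self.table))]
--         return "".join([str(i) + " " + str(L[i]) + "\n" for i in range(len(self.table))])
--
--     def insert(self, key, value):
--         """ insert key,value into table
--             Allow repetitions of keys """
--         i = self.hash_mod(key)  # hash on key only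
--         item = [key, value]  # pack into one item
--         self.table[i].append(item)
--
--     def find(self, key):
--         """ returns ALL values of key as a list, empty list if none """
--
--         # Get the index of the current key in the hashtable.
--         i = self.hash_mod(key)
--
--         # The same index can match to multiple keys. Therefore we must iterate the list of the current index and extract only the items with the received key.
--         return [item[1] for item in self.table[i] if item[0] == key]
--
-- def prefix_suffix_overlap_hash1(lst, k):
--
--     k_match = []
--
--     # We define m to be n because the strings already exist in the memory, it means that their size is handled fine in the current machine.
--     d = Dict(len(lst))
--
--     # Let's insert each string to it's right place in the dictionary.
--     for i in range(len(lst)):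
--         d.insert(lst[i][:k], i)
--
--     # Now let's create the list to return.
--     for j in range(len(lst)):
--         share_key = d.find(lst[j][-k:])
--         for i in share_key:
--             if i != j:
--                 k_match.append((i, j))
--
--     return k_match
-- ===== SOURCE B (Python) =====
-- def prefix_suffix_overlap_hash1(lst, k):
--     # Naive nested scan: no hash table, compare the slices directly.
--     res = []
--     for j in range(len(lst)):
--         for i in range(len(lst)):
--             if i != j and lst[i][:k] == lst[j][-k:]:
--                 res.append((i, j))
--     return res
-- ===== Notes on version B (the rewrite author's own statement) =====
-- stated objective: simpler
-- what changed: Replaced the hand-rolled hash-table class (build an index of k-prefixes, then probe it per suffix) with a plain nested double loop that compares the slices lst[i][:k] and lst[j][-k:] directly.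
import Mathlib
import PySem

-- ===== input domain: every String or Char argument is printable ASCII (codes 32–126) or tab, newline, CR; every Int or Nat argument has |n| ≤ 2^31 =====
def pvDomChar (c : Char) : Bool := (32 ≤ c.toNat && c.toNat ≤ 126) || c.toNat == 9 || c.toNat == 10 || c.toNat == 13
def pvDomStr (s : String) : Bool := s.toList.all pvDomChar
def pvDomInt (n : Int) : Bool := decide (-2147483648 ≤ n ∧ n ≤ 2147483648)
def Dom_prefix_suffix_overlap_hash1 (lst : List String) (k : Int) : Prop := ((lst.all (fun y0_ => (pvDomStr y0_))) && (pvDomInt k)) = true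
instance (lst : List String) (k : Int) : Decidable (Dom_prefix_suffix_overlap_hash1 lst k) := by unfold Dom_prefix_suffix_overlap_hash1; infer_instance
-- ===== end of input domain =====

-- B drops A's hand-rolled hash table and does the naive nested slice comparison ('simpler');
-- the proved agreement is about the RETURN value (neither version mutates its arguments).

-- ===== PORT A =====
-- Python's builtin hash() is salted per process; A's output is provably independent of the
-- hash function (find filters the bucket by exact key), so the port fixes hash_func = fun _ => 0.
-- Dict.insert: i = hash_mod(key); table[i].append([key, value])
def pvDictInsert (table : List (List (String × Int))) (m : Int) (key : String) (v : Int) :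
    List (List (String × Int)) :=
  let i : Int := 0 % m    -- hash_func key % m, with hash_func = 0
  table.set i.toNat (table.getD i.toNat [] ++ [(key, v)])

-- Dict.find: i = hash_mod(key); [item[1] for item in table[i] if item[0] == key]
def pvDictFind (table : List (List (String × Int))) (m : Int) (key : String) : List Int :=
  let i : Int := 0 % m
  ((table.getD i.toNat []).filter (fun item => item.1 == key)).map (fun item => item.2)

def prefix_suffix_overlap_hash1 (lst : List String) (k : Int) : List (Int × Int) :=
  let n : Int := lst.length
  -- Dict.__init__: table = [[] for i in range(m)], m = len(lst)
  let table0 : List (List (String × Int)) :=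
    (PySem.List.pyRange 0 n 1).foldl (fun tb _ => tb ++ [[]]) []
  -- for i in range(len(lst)): d.insert(lst[i][:k], i)
  let table :=
    (PySem.List.pyRange 0 n 1).foldl
      (fun tb i => pvDictInsert tb n (PySem.Str.slice (PySem.List.pyGetD lst i "") none (some k)) i)
      table0
  -- for j in range(len(lst)): share_key = d.find(lst[j][-k:]); for i in share_key: if i != j: append (i, j)
  (PySem.List.pyRange 0 n 1).foldl
    (fun acc j =>
      let share_key := pvDictFind table n (PySem.Str.slice (PySem.List.pyGetD lst j "") (some (-k)) none)
      share_key.foldl (fun acc2 i => if i != j then acc2 ++ [(i, j)] else acc2) acc)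
    []

-- ===== PORT B =====
def prefix_suffix_overlap_hash1_alt (lst : List String) (k : Int) : List (Int × Int) :=
  let n : Int := lst.length
  (PySem.List.pyRange 0 n 1).foldl
    (fun acc j =>
      (PySem.List.pyRange 0 n 1).foldl
        (fun acc2 i =>
          if i != j &&
             (PySem.Str.slice (PySem.List.pyGetD lst i "") none (some k) ==
              PySem.Str.slice (PySem.List.pyGetD lst j "") (some (-k)) none)
          then acc2 ++ [(i, j)] else acc2)
        acc)
    []

-- ===== PRECONDITION & SPEC =====
def Spec_prefix_suffix_overlap_hash1 (lst : List String) (k : Int) (out : List (Int × Int)) : Prop := out = prefix_suffix_overlap_hash1_alt lst k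
instance (lst : List String) (k : Int) (out : List (Int × Int)) : Decidable (Spec_prefix_suffix_overlap_hash1 lst k out) := by unfold Spec_prefix_suffix_overlap_hash1; infer_instance

-- ===== CLAIM (what is proved, stated in full; the proofs are below) =====
def Claim_equal_prefix_suffix_overlap_hash1 : Prop := ∀ (lst : List String) (k : Int), Dom_prefix_suffix_overlap_hash1 lst k → Spec_prefix_suffix_overlap_hash1 lst k (prefix_suffix_overlap_hash1 lst k)

-- ===== LEMMAS AND PROOFS =====

-- bucket 0 of the table after a run of inserts: the inserts append in order
theorem pv_foldl_insert_getD (m : Int) (f : Int → String) (li : List Int) :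
    ∀ (tb : List (List (String × Int))), 0 < tb.length →
      (li.foldl (fun tb i => pvDictInsert tb m (f i) i) tb).getD 0 [] =
        tb.getD 0 [] ++ li.map (fun i => (f i, i)) := by
  induction li with
  | nil => intro tb _; simp
  | cons x xs ih =>
    intro tb htb
    have hset : (pvDictInsert tb m (f x) x).getD 0 [] = tb.getD 0 [] ++ [(f x, x)] := by
      simp [pvDictInsert, List.getD_eq_getElem?_getD,
        (by omega : 0 < tb.length)]
    have hlen : 0 < (pvDictInsert tb m (f x) x).length := by
      simpa [pvDictInsert] using htb
    simp only [List.foldl_cons]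
    rw [ih _ hlen, hset, List.append_assoc]; rfl

theorem pv_table0_getD (n : Int) (hn : 0 < n) :
    ((PySem.List.pyRange 0 n 1).foldl
        (fun (tb : List (List (String × Int))) _ => tb ++ [[]]) []).getD 0 [] = [] ∧
    0 < ((PySem.List.pyRange 0 n 1).foldl
        (fun (tb : List (List (String × Int))) _ => tb ++ [[]]) []).length := by
  rw [PySem.List.foldl_append_singleton_eq_map]
  constructor
  · cases h : (PySem.List.pyRange 0 n 1).map (fun _ => ([] : List (String × Int))) with
    | nil => simp
    | cons a l =>
      have : a ∈ (PySem.List.pyRange 0 n 1).map (fun _ => ([] : List (String × Int))) := by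
        rw [h]; exact List.mem_cons_self
      rcases List.mem_map.mp this with ⟨_, _, rfl⟩
      simp
  · have h := PySem.List.length_pyRange_one 0 n
    simp only [List.nil_append, List.length_map, h]
    omega

-- ===== VERDICT (by name: the statement is the Claim_ definition above) =====
theorem prefix_suffix_overlap_hash1_spec : Claim_equal_prefix_suffix_overlap_hash1 := by
  intro lst k _
  unfold Spec_prefix_suffix_overlap_hash1 prefix_suffix_overlap_hash1 prefix_suffix_overlap_hash1_alt
  by_cases hn : lst.length = 0
  · simp [hn, PySem.List.pyRange_one_eq_nil]
  · have hn' : 0 < (lst.length : Int) := by exact_mod_cast Nat.pos_of_ne_zero hn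
    set n : Int := (lst.length : Int) with hndef
    set P : Int → String := fun i => PySem.Str.slice (PySem.List.pyGetD lst i "") none (some k) with hP
    set S : Int → String := fun j => PySem.Str.slice (PySem.List.pyGetD lst j "") (some (-k)) none with hS
    obtain ⟨h0, hlen⟩ := pv_table0_getD n hn'
    have htable :
        ((PySem.List.pyRange 0 n 1).foldl
            (fun tb i => pvDictInsert tb n (P i) i)
            ((PySem.List.pyRange 0 n 1).foldl (fun tb _ => tb ++ [[]]) [])).getD 0 [] =
          (PySem.List.pyRange 0 n 1).map (fun i => (P i, i)) := by
      rw [pv_foldl_insert_getD n P _ _ hlen, h0, List.nil_append]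
    apply PySem.List.foldl_congr_mem
    intro acc j _
    have hfind :
        pvDictFind
            ((PySem.List.pyRange 0 n 1).foldl
              (fun tb i => pvDictInsert tb n (P i) i)
              ((PySem.List.pyRange 0 n 1).foldl (fun tb _ => tb ++ [[]]) [])) n (S j) =
          ((PySem.List.pyRange 0 n 1).filter (fun i => P i == S j)).map id := by
      simp only [pvDictFind, Int.zero_emod, Int.toNat_zero, htable]
      rw [List.filter_map, List.map_map]
      rfl
    rw [hfind, List.map_id]
    rw [PySem.List.foldl_append_if (fun i => i != j) (fun i => (i, j))]
    rw [PySem.List.foldl_append_if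
      (fun i => i != j && (P i == S j)) (fun i => (i, j))]
    rw [List.filter_filter]
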